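-- pv_equiv track=rewrite | github.com/NonSenseGuy/ai-class-lab | 03-games/minimax_game.py | remove_move
-- ===== SOURCE A (Python) =====
-- def remove_move(boxes, move):
--     move_box, move_side = move.split(' ')
--     clone = boxes[:]
--     opposites = {
--         'T': 'B',
--         'B': 'T',
--         'L': 'R',
--         'R': 'L'
--     }
--     for i, box in enumerate(clone):
--         if box[0] == move_box:
--             new_sides = box[1].replace(move_side, '')
--             clone[i] = (box[0], new_sides) if new_sides != '' else None
--         elif ((move_side == 'R' and move_box[1] == box[0][1] and ord(move_box[0])+1 == ord(box[0][0])) or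
--                 (move_side == 'T' and move_box[0] == box[0][0] and ord(move_box[1])+1 == ord(box[0][1])) ):
--             new_sides = box[1].replace(opposites[move_side], '')
--             clone[i] = (box[0], new_sides) if new_sides != '' else None
--
--     nonone = list(filter(lambda b: not (b is None), clone))
--
--     return nonone
-- ===== SOURCE B (Python) =====
-- def remove_move(boxes, move):
--     move_box, move_side = move.split(' ')
--
--     def strip(bs, hit, side):
--         out = []
--         for name, sides in bs:
--             if hit(name):
--                 rest = sides.replace(side, '')
--                 if rest:
--                     out.append((name, rest))
--             else:
--                 out.append((name, sides))
--         return out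
--
--     # stage 1: strip the move's own side from the named box
--     result = strip(boxes, lambda n: n == move_box, move_side)
--     # stage 2: only 'R' and 'T' moves also touch one neighbour, whose 2-char id
--     # is computed once from the move alone
--     if move_side == 'R' and len(move_box) >= 2:
--         key = chr(ord(move_box[0]) + 1) + move_box[1]
--         result = strip(result, lambda n: n[:2] == key, 'L')
--     elif move_side == 'T' and len(move_box) >= 2:
--         key = move_box[0] + chr(ord(move_box[1]) + 1)
--         result = strip(result, lambda n: n[:2] == key, 'B')
--     return result
-- ===== Notes on version B (the rewrite author's own statement) =====
-- stated objective: alternative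
-- what changed: B replaces A's single pass (per-box elif with ord-arithmetic, None markers, then a filter pass) by two staged passes of one generic strip helper: stage 1 strips the move's side from the box named by the move, stage 2 computes the single affected neighbour id once from the move alone and strips its opposite side; correctness rests on the two edits being disjoint (the neighbour id always differs from the move's own id).
import Mathlib
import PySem

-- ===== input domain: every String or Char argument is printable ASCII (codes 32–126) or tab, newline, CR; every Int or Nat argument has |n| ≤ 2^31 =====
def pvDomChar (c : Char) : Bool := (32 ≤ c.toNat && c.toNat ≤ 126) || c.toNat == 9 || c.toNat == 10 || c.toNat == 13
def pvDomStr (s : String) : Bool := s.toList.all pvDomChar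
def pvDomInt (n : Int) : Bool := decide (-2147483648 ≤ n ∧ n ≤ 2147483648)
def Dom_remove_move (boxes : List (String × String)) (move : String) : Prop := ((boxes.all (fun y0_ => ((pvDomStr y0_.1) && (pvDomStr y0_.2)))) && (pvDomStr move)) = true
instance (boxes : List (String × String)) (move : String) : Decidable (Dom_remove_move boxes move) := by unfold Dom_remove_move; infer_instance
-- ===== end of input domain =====

-- B replaces A's single marker-and-filter pass by two staged passes of one generic
-- strip helper, with the affected neighbour id computed once from the move alone.

-- ===== PORT A =====
-- the elif condition for move_side == 'R':  move_box[1] == box[0][1] and ord(move_box[0])+1 == ord(box[0][0])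
-- (an out-of-range index = IndexError in Python = `none` here, mapped to false; excluded by Pre_)
def aCondR (mb name : String) : Bool :=
  match PySem.Str.pyGet? mb 1, PySem.Str.pyGet? name 1, PySem.Str.pyGet? mb 0, PySem.Str.pyGet? name 0 with
  | some m1, some b1, some m0, some b0 => m1 == b1 && (m0.toNat + 1 == b0.toNat)
  | _, _, _, _ => false

-- the elif condition for move_side == 'T':  move_box[0] == box[0][0] and ord(move_box[1])+1 == ord(box[0][1])
def aCondT (mb name : String) : Bool :=
  match PySem.Str.pyGet? mb 0, PySem.Str.pyGet? name 0 with
  | some m0, some b0 =>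
    if m0 == b0 then
      match PySem.Str.pyGet? mb 1, PySem.Str.pyGet? name 1 with
      | some m1, some b1 => (m1.toNat + 1 == b1.toNat)
      | _, _ => false
    else false
  | _, _ => false

-- the loop body: the value written into clone[i] for box i (A writes each slot exactly once)
def aEntry (mb ms : String) (box : String × String) : Option (String × String) :=
  if box.1 == mb then
    let new_sides := PySem.Str.replace box.2 ms ""
    if new_sides == "" then none else some (box.1, new_sides)
  else if (ms == "R" && aCondR mb box.1) || (ms == "T" && aCondT mb box.1) then
    -- opposites[move_side]: in this branch ms is "R" or "T", so the dict lookup is "L" resp. "B"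
    let new_sides := PySem.Str.replace box.2 (if ms == "R" then "L" else "B") ""
    if new_sides == "" then none else some (box.1, new_sides)
  else some box

def remove_move (boxes : List (String × String)) (move : String) : List (String × String) :=
  match PySem.Str.split? move " " with
  | some [mb, ms] =>
      let clone := boxes.map (aEntry mb ms)
      clone.filterMap id          -- list(filter(lambda b: not (b is None), clone))
  | _ => []                       -- unpacking 'move_box, move_side = …' raises; excluded by Pre_

-- ===== PORT B =====
-- the generic helper: one pass stripping `side` from every box whose name `hit` accepts,
-- dropping boxes whose side string becomes empty
def bStrip (hit : String → Bool) (side : String) : List (String × String) → List (String × String)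
  | [] => []
  | (name, sides) :: rest =>
    if hit name then
      let r := PySem.Str.replace sides side ""
      if r == "" then bStrip hit side rest else (name, r) :: bStrip hit side rest
    else (name, sides) :: bStrip hit side rest

def remove_move_alt (boxes : List (String × String)) (move : String) : List (String × String) :=
  match PySem.Str.split? move " " with
  | none => []                      -- unpacking raises; excluded by Pre_
  | some parts =>
    match parts with
    | [] => []                      -- too few words: unpacking raises; excluded by Pre_
    | mb :: parts1 =>
      match parts1 with
      | [] => []                    -- too few words: unpacking raises; excluded by Pre_
      | ms :: parts2 =>
        if parts2.isEmpty then
          -- stage 1: strip the move's own side from the named box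
          let result := bStrip (fun n => n == mb) ms boxes
          -- stage 2: an 'R' or 'T' move also strips the opposite side of one
          -- neighbour, whose 2-char id is computed once from the move alone
          if ms == "R" then
            match mb.toList with
            | [] => result
            | [_] => result
            | m0 :: m1 :: _ =>
              bStrip (fun n => n.toList.take 2 == [Char.ofNat (m0.toNat + 1), m1]) "L" result
          else if ms == "T" then
            match mb.toList with
            | [] => result
            | [_] => result
            | m0 :: m1 :: _ =>
              bStrip (fun n => n.toList.take 2 == [m0, Char.ofNat (m1.toNat + 1)]) "B" result
          else result
        else []                     -- too many words: unpacking raises; excluded by Pre_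

-- ===== PRECONDITION & SPEC =====
-- Pre_ excludes exactly the inputs where A raises: a move that is not two space-separated
-- words (unpacking ValueError), and the box/move ids too short for the indexing the elif
-- actually performs under Python's short-circuit evaluation (IndexError).
-- the two words of the move (empty defaults are never reached when the split has 2 parts)
def moveParts (move : String) : List String := (PySem.Str.split? move " ").getD []
def moveBox0 (move : String) : String := (moveParts move).getD 0 ""
def moveSide0 (move : String) : String := (moveParts move).getD 1 ""

def Pre_remove_move (boxes : List (String × String)) (move : String) : Prop :=
  (moveParts move).length = 2 ∧
  ∀ b ∈ boxes, b.1 ≠ moveBox0 move →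
    (moveSide0 move = "R" → 2 ≤ (moveBox0 move).toList.length ∧ 2 ≤ b.1.toList.length) ∧
    (moveSide0 move = "T" → 1 ≤ (moveBox0 move).toList.length ∧ 1 ≤ b.1.toList.length ∧
      ((moveBox0 move).toList[0]? = b.1.toList[0]? →
        2 ≤ (moveBox0 move).toList.length ∧ 2 ≤ b.1.toList.length))
instance (boxes : List (String × String)) (move : String) : Decidable (Pre_remove_move boxes move) := by
  unfold Pre_remove_move; infer_instance

def pvWitness_remove_move : (List (String × String)) × String :=
  ([("a1", "TBLR"), ("b1", "TBLR"), ("a2", "TBLR")], "a1 R")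

def Spec_remove_move (boxes : List (String × String)) (move : String) (out : List (String × String)) : Prop := out = remove_move_alt boxes move
instance (boxes : List (String × String)) (move : String) (out : List (String × String)) : Decidable (Spec_remove_move boxes move out) := by unfold Spec_remove_move; infer_instance

-- ===== CLAIM (what is proved, stated in full; the proofs are below) =====
def Claim_equal_remove_move : Prop := ∀ (boxes : List (String × String)) (move : String), Dom_remove_move boxes move → Pre_remove_move boxes move → Spec_remove_move boxes move (remove_move boxes move)

-- ===== LEMMAS AND PROOFS =====

-- the neighbour table B's stage 2 works from, as one value for the proofs
def mkAdj (mb ms : String) : Option (List Char × String) :=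
  match mb.toList with
  | [] => none
  | m0 :: rest =>
    match rest with
    | [] => none
    | m1 :: _ =>
      if ms == "R" then some ([Char.ofNat (m0.toNat + 1), m1], "L")
      else if ms == "T" then some ([m0, Char.ofNat (m1.toNat + 1)], "B")
      else none

-- every Char's code point is valid
lemma char_toNat_valid (c : Char) : Nat.isValidChar c.toNat := by
  have h1 := Char.toNat_le_max c
  have h2 := Char.toNat_not_surrogate c
  simp [Nat.isValidChar, Char.max, Char.minSurrogate, Char.maxSurrogate] at *
  omega

-- a printable-ASCII char (or tab/CR/LF) never has code 0
lemma hDomChar_ne_zero {c : Char} (h : pvDomChar c = true) : c.toNat ≠ 0 := by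
  simp [pvDomChar] at h; omega

-- chr(ord c + 1) = b ↔ ord c + 1 = ord b, for b a Dom char (chr's invalid-code fallback has code 0)
lemma ofNat_succ_eq_iff {c b : Char} (hb : pvDomChar b = true) :
    (Char.ofNat (c.toNat + 1) = b) ↔ (c.toNat + 1 = b.toNat) := by
  by_cases hv : Nat.isValidChar (c.toNat + 1)
  · constructor
    · intro h
      have := congrArg Char.toNat h
      rwa [Char.toNat_ofNat, if_pos hv] at this
    · intro h; rw [h, Char.ofNat_toNat]
  · constructor
    · intro h
      exfalso
      have h0 := congrArg Char.toNat h
      rw [Char.toNat_ofNat, if_neg hv] at h0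
      exact hDomChar_ne_zero hb h0.symm
    · intro h
      exact absurd (h ▸ char_toNat_valid b) hv

-- chr(ord c + 1) is never c itself (even through chr's invalid-code fallback)
lemma ofNat_succ_ne (c : Char) : Char.ofNat (c.toNat + 1) ≠ c := by
  intro h
  have h0 := congrArg Char.toNat h
  rw [Char.toNat_ofNat] at h0
  split_ifs at h0 with hv
  · omega
  · rw [← h0] at hv
    exact hv (Or.inl (by norm_num))

-- A's elif condition equals B's lookup of the precomputed neighbour key
lemma cond_eq (mb ms name : String) (hdn : pvDomStr name = true) (_hne : name ≠ mb)
    (hR : ms = "R" → 2 ≤ mb.toList.length ∧ 2 ≤ name.toList.length)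
    (hT : ms = "T" → 1 ≤ mb.toList.length ∧ 1 ≤ name.toList.length ∧
      (mb.toList[0]? = name.toList[0]? → 2 ≤ mb.toList.length ∧ 2 ≤ name.toList.length)) :
    ((ms == "R" && aCondR mb name) || (ms == "T" && aCondT mb name))
      = (match mkAdj mb ms with
         | some (akey, _) => name.toList.take 2 == akey
         | none => false) := by
  have hall : ∀ c ∈ name.toList, pvDomChar c = true := by
    intro c hc
    simp only [pvDomStr, List.all_eq_true] at hdn
    exact hdn c hc
  by_cases hmsR : ms = "R"
  · subst hmsR
    obtain ⟨hmb2, hn2⟩ := hR rfl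
    rcases hmb : mb.toList with _ | ⟨m0, tl⟩
    · rw [hmb] at hmb2; simp at hmb2
    rcases tl with _ | ⟨m1, t⟩
    · rw [hmb] at hmb2; simp at hmb2
    rcases hn : name.toList with _ | ⟨b0, ul⟩
    · rw [hn] at hn2; simp at hn2
    rcases ul with _ | ⟨b1, u⟩
    · rw [hn] at hn2; simp at hn2
    have hb0 : pvDomChar b0 = true := hall b0 (by rw [hn]; simp)
    simp only [aCondR, mkAdj, hmb, hn, pysem]
    simp only [List.getElem?_cons_zero, List.getElem?_cons_succ, List.take_succ_cons,
      List.take_zero]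
    rw [Bool.eq_iff_iff]
    simp
    constructor
    · rintro ⟨h1, h2⟩
      exact ⟨((ofNat_succ_eq_iff hb0).mpr h2).symm, h1.symm⟩
    · rintro ⟨g1, g2⟩
      exact ⟨g2.symm, (ofNat_succ_eq_iff hb0).mp g1.symm⟩
  · by_cases hmsT : ms = "T"
    · subst hmsT
      obtain ⟨hmb1, hn1, himp⟩ := hT rfl
      rcases hmb : mb.toList with _ | ⟨m0, t⟩
      · rw [hmb] at hmb1; simp at hmb1
      rcases hn : name.toList with _ | ⟨b0, u⟩
      · rw [hn] at hn1; simp at hn1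
      rw [hmb, hn] at himp
      by_cases hb : m0 = b0
      · obtain ⟨hmb2, hn2⟩ := himp (by simp [hb])
        rcases t with _ | ⟨m1, t'⟩
        · simp at hmb2
        rcases u with _ | ⟨b1, u'⟩
        · simp at hn2
        have hb1 : pvDomChar b1 = true := hall b1 (by rw [hn]; simp)
        subst hb
        simp only [aCondT, mkAdj, hmb, hn, pysem]
        simp only [List.getElem?_cons_zero, List.getElem?_cons_succ, List.take_succ_cons,
          List.take_zero]
        rw [Bool.eq_iff_iff]
        simp
        constructor
        · intro h
          exact ((ofNat_succ_eq_iff hb1).mpr h).symm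
        · intro h
          exact (ofNat_succ_eq_iff hb1).mp h.symm
      · simp only [aCondT, mkAdj, hmb, hn, pysem]
        simp only [List.getElem?_cons_zero]
        rcases t with _ | ⟨m1, t'⟩
        · simp [hb]
        rcases u with _ | ⟨b1, u'⟩
        · simp [hb]
        · simp [hb, Ne.symm hb]
    · have h1 : (ms == "R") = false := by simp [hmsR]
      have h2 : (ms == "T") = false := by simp [hmsT]
      have h3 : (("R":String) == ms) = false := by simpa using Ne.symm hmsR
      have h4 : (("T":String) == ms) = false := by simpa using Ne.symm hmsT
      simp only [h1, h2, Bool.false_and, Bool.or_false, mkAdj]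
      rcases mb.toList with _ | ⟨m0, _ | ⟨m1, t⟩⟩ <;> simp

-- the side stored in the table is the one A strips in the elif branch
lemma mkAdj_side (mb ms : String) (akey : List Char) (aside : String)
    (h : mkAdj mb ms = some (akey, aside)) : aside = (if ms == "R" then "L" else "B") := by
  unfold mkAdj at h
  rcases hmb : mb.toList with _ | ⟨m0, _ | ⟨m1, t⟩⟩ <;> rw [hmb] at h
  · simp at h
  · simp at h
  · split_ifs at h with h1 h2 <;> simp_all

-- disjointness of the two staged edits: the neighbour key never matches the move's own box id
lemma mkAdj_key_ne_self (mb ms : String) (akey : List Char) (aside : String)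
    (h : mkAdj mb ms = some (akey, aside)) : mb.toList.take 2 ≠ akey := by
  unfold mkAdj at h
  rcases hmb : mb.toList with _ | ⟨m0, _ | ⟨m1, t⟩⟩ <;> rw [hmb] at h
  · simp at h
  · simp at h
  · split_ifs at h with h1 h2
    · simp only [Option.some.injEq, Prod.mk.injEq] at h
      obtain ⟨hk, -⟩ := h
      subst hk
      simp only [List.take_succ_cons, List.take_zero]
      intro he
      injection he with e1 e2
      exact ofNat_succ_ne m0 e1.symm
    · simp only [Option.some.injEq, Prod.mk.injEq] at h
      obtain ⟨hk, -⟩ := h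
      subst hk
      simp only [List.take_succ_cons, List.take_zero]
      intro he
      injection he with e1 e2
      injection e2 with e2a e2b
      exact ofNat_succ_ne m1 e2a.symm

-- A's single marker-and-filter pass equals the two staged strip passes
lemma stage_eq (mb ms : String) (boxes : List (String × String))
    (hdom : ∀ b ∈ boxes, pvDomStr b.1 = true)
    (hpre : ∀ b ∈ boxes, b.1 ≠ mb →
        (ms = "R" → 2 ≤ mb.toList.length ∧ 2 ≤ b.1.toList.length) ∧
        (ms = "T" → 1 ≤ mb.toList.length ∧ 1 ≤ b.1.toList.length ∧
          (mb.toList[0]? = b.1.toList[0]? → 2 ≤ mb.toList.length ∧ 2 ≤ b.1.toList.length))) :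
    List.filterMap (aEntry mb ms) boxes =
      (match mkAdj mb ms with
       | some (akey, aside) =>
           bStrip (fun n => n.toList.take 2 == akey) aside (bStrip (fun n => n == mb) ms boxes)
       | none => bStrip (fun n => n == mb) ms boxes) := by
  induction boxes with
  | nil => rcases h : mkAdj mb ms with _ | ⟨akey, aside⟩ <;> simp [bStrip]
  | cons hd rest ih =>
    obtain ⟨name, sides⟩ := hd
    have IH := ih (fun b hb => hdom b (by simp [hb])) (fun b hb => hpre b (List.mem_cons_of_mem _ hb))
    rcases hadj : mkAdj mb ms with _ | ⟨akey, aside⟩ <;> rw [hadj] at IH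
    · by_cases h1 : name = mb
      · subst h1
        by_cases hs : PySem.Str.replace sides ms "" = ""
        · have he : aEntry name ms (name, sides) = none := by simp [aEntry, hs]
          rw [List.filterMap_cons_none he, IH]
          simp [bStrip, hs]
        · have he : aEntry name ms (name, sides) = some (name, PySem.Str.replace sides ms "") := by
            simp [aEntry, hs]
          rw [List.filterMap_cons_some he, IH]
          simp [bStrip, hs]
      · have h1' : (name == mb) = false := by simp [h1]
        have hc' : ((ms == "R" && aCondR mb name) || (ms == "T" && aCondT mb name)) = false := by
          rw [cond_eq mb ms name (hdom (name, sides) (by simp)) h1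
            (hpre (name, sides) (by simp) h1).1 (hpre (name, sides) (by simp) h1).2, hadj]
        have he : aEntry mb ms (name, sides) = some (name, sides) := by
          simp [aEntry, h1', hc']
        rw [List.filterMap_cons_some he, IH]
        simp [bStrip, h1']
    · have hside := mkAdj_side mb ms akey aside hadj
      by_cases h1 : name = mb
      · subst h1
        have hq : (name.toList.take 2 == akey) = false := by
          simpa using mkAdj_key_ne_self name ms akey aside hadj
        by_cases hs : PySem.Str.replace sides ms "" = ""
        · have he : aEntry name ms (name, sides) = none := by simp [aEntry, hs]
          rw [List.filterMap_cons_none he, IH]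
          simp [bStrip, hs]
        · have he : aEntry name ms (name, sides) = some (name, PySem.Str.replace sides ms "") := by
            simp [aEntry, hs]
          rw [List.filterMap_cons_some he, IH]
          simp [bStrip, hs, hq]
      · have h1' : (name == mb) = false := by simp [h1]
        have hc' : ((ms == "R" && aCondR mb name) || (ms == "T" && aCondT mb name))
            = (name.toList.take 2 == akey) := by
          rw [cond_eq mb ms name (hdom (name, sides) (by simp)) h1
            (hpre (name, sides) (by simp) h1).1 (hpre (name, sides) (by simp) h1).2, hadj]
        by_cases ht : name.toList.take 2 = akey
        · have ht2 : (name.toList.take 2 == akey) = true := by simp [ht]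
          rw [ht2] at hc'
          by_cases hs : PySem.Str.replace sides (if ms = "R" then "L" else "B") "" = ""
          · have he : aEntry mb ms (name, sides) = none := by
              simp [aEntry, h1', hc', hs]
            rw [List.filterMap_cons_none he, IH]
            simp [bStrip, h1', ht2, hside, hs]
          · have he : aEntry mb ms (name, sides)
                = some (name, PySem.Str.replace sides (if ms = "R" then "L" else "B") "") := by
              simp [aEntry, h1', hc', hs]
            rw [List.filterMap_cons_some he, IH]
            simp [bStrip, h1', ht2, hside, hs]
        · have ht2 : (name.toList.take 2 == akey) = false := by simp [ht]
          rw [ht2] at hc'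
          have he : aEntry mb ms (name, sides) = some (name, sides) := by
            simp [aEntry, h1', hc']
          rw [List.filterMap_cons_some he, IH]
          simp [bStrip, h1', ht2]

-- equation lemmas: each port under a successful two-word split
lemma remove_move_eq (boxes : List (String × String)) (move mb ms : String)
    (h : PySem.Str.split? move " " = some [mb, ms]) :
    remove_move boxes move = List.filterMap (aEntry mb ms) boxes := by
  unfold remove_move
  rw [h]
  simp [List.filterMap_map, Function.id_comp]

lemma remove_move_alt_eq (boxes : List (String × String)) (move mb ms : String)
    (h : PySem.Str.split? move " " = some [mb, ms]) :
    remove_move_alt boxes move =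
      (match mkAdj mb ms with
       | some (akey, aside) =>
           bStrip (fun n => n.toList.take 2 == akey) aside (bStrip (fun n => n == mb) ms boxes)
       | none => bStrip (fun n => n == mb) ms boxes) := by
  unfold remove_move_alt mkAdj
  rw [h]
  by_cases hR : ms = "R"
  · subst hR
    rcases hmb : mb.toList with _ | ⟨m0, _ | ⟨m1, t⟩⟩ <;> simp [hmb]
  · by_cases hT : ms = "T"
    · subst hT
      rcases hmb : mb.toList with _ | ⟨m0, _ | ⟨m1, t⟩⟩ <;> simp [hmb, hR]
    · rcases hmb : mb.toList with _ | ⟨m0, _ | ⟨m1, t⟩⟩ <;> simp [hmb, hR, hT]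

-- ===== VERDICT (by name: the statement is the Claim_ definition above) =====
theorem remove_move_spec : Claim_equal_remove_move := by
  intro boxes move hdom hpre
  unfold Spec_remove_move
  obtain ⟨hlen, hpre2⟩ := hpre
  have hdom' : ∀ b ∈ boxes, pvDomStr b.1 = true := by
    simp [Dom_remove_move] at hdom
    intro b hb; exact (hdom.1 b.1 b.2 hb).1
  rcases h : PySem.Str.split? move " " with _ | l
  · simp [moveParts, h] at hlen
  rcases l with _ | ⟨mb, l⟩
  · simp [moveParts, h] at hlen
  rcases l with _ | ⟨ms, l⟩
  · simp [moveParts, h] at hlen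
  rcases l with _ | ⟨x, l⟩
  · have hmb : moveBox0 move = mb := by simp [moveBox0, moveParts, h]
    have hms : moveSide0 move = ms := by simp [moveSide0, moveParts, h]
    rw [hmb, hms] at hpre2
    rw [remove_move_eq boxes move mb ms h, remove_move_alt_eq boxes move mb ms h]
    exact stage_eq mb ms boxes hdom' hpre2
  · simp [moveParts, h] at hlen
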